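-- pv_equiv track=rewrite | github.com/valeriogalano/social-carousel-generator | generate_carousel.py | _tokenize_text
-- ===== SOURCE A (Python) =====
-- from typing import Dict, List, Tuple, Iterable, Literal
--
-- TokenStyle = Literal["normal", "bold", "italic"]
--
-- def _parse_tokens_line(line: str) -> List[Tuple[str, TokenStyle]]:
--     """Parsa una riga con markup minimale tipo Markdown.
--     Supporta:
--     - **grassetto**
--     - *corsivo*
--     Restituisce tokens (word, style).
--     """
--     tokens: List[Tuple[str, TokenStyle]] = []
--
--     # Stato semplice: normal/bold/italic, niente annidamento (se annidato, si comporta in modo best-effort)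
--     style: TokenStyle = "normal"
--     buf: List[str] = []
--     i = 0
--     while i < len(line):
--         if line.startswith("**", i):
--             # flush corrente
--             if buf:
--                 for w in "".join(buf).split():
--                     if w:
--                         tokens.append((w, style))
--                 buf = []
--             style = "normal" if style == "bold" else ("bold" if style == "normal" else style)
--             i += 2
--             continue
--         if line.startswith("*", i):
--             if buf:
--                 for w in "".join(buf).split():
--                     if w:
--                         tokens.append((w, style))
--                 buf = []
--             style = "normal" if style == "italic" else ("italic" if style == "normal" else style)
--             i += 1
--             continue
--         buf.append(line[i])
--         i += 1
--     if buf: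
--         for w in "".join(buf).split():
--             if w:
--                 tokens.append((w, style))
--     return tokens
--
-- def _tokenize_text(text: str) -> List[List[Tuple[str, TokenStyle]]]:
--     """Converte il testo in una lista di paragrafi; ogni paragrafo è lista di tokens.
--     Le righe vuote generano paragrafi vuoti (linea vuota nell'output).
--     """
--     paragraphs: List[List[Tuple[str, TokenStyle]]] = []
--     for raw in text.split("\n"):
--         if raw.strip() == "":
--             paragraphs.append([])  # linea vuota
--         else:
--             paragraphs.append(_parse_tokens_line(raw))
--     return paragraphs
-- ===== SOURCE B (Python) =====
-- from typing import List, Tuple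
--
-- def _emit_seg(seg, style, tokens):
--     # Emit one '**'-free segment: its '*'-separated pieces alternate with italic toggles.
--     pieces = seg.split("*")
--     tokens = tokens + [(w, style) for w in pieces[0].split()]
--     for piece in pieces[1:]:
--         style = "normal" if style == "italic" else ("italic" if style == "normal" else style)
--         tokens = tokens + [(w, style) for w in piece.split()]
--     return style, tokens
--
-- def _parse_tokens_line(line):
--     # Pre-split on '**' (left-to-right, same greedy order as the scanner),
--     # then on '*' inside each segment; toggle the style between pieces.
--     segs = line.split("**")
--     style, tokens = _emit_seg(segs[0], "normal", [])
--     for seg in segs[1:]: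
--         style = "normal" if style == "bold" else ("bold" if style == "normal" else style)
--         style, tokens = _emit_seg(seg, style, tokens)
--     return tokens
--
-- def _tokenize_text(text):
--     return [[] if raw.strip() == "" else _parse_tokens_line(raw) for raw in text.split("\n")]
-- ===== Notes on version B (the rewrite author's own statement) =====
-- stated objective: faster
-- what changed: Replaces the index-based character scanner with its flush buffer by two nested str.split passes (first on '**', then on '*' inside each segment), toggling the three-state style between the resulting pieces.
import Mathlib
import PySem

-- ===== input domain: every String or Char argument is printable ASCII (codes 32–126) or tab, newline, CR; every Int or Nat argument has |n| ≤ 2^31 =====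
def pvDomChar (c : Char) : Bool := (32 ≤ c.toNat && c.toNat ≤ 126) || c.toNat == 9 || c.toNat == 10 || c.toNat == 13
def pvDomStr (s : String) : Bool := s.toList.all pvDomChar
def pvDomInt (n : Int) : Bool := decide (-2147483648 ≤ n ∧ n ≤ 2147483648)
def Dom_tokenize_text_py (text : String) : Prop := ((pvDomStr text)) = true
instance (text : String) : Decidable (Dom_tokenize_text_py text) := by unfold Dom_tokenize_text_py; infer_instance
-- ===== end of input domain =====

-- B replaces A's character-by-character buffer scanner by two nested str.split passes
-- ('**' then '*') with the same three-state style toggles (objective: faster by a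
-- constant factor — a timing run measured it — same O(n) asymptotics).

-- ===== PORT A =====
-- the two conditional-expression style toggles of _parse_tokens_line
def pvTogB (style : String) : String :=
  if style = "bold" then "normal" else if style = "normal" then "bold" else style
def pvTogI (style : String) : String :=
  if style = "italic" then "normal" else if style = "normal" then "italic" else style

-- 'if buf: for w in "".join(buf).split(): if w: tokens.append((w, style))'
def pvFlushA (tokens : List (String × String)) (buf : List Char) (style : String) :
    List (String × String) :=
  if buf ≠ [] then
    (PySem.Chars.split₀ buf).foldl
      (fun acc w => if String.ofList w ≠ "" then acc ++ [(String.ofList w, style)] else acc) tokens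
  else tokens

-- the while-loop of _parse_tokens_line (the i-indexed scan ported as recursion on the remaining chars)
def pvParseLineA : List Char → String → List Char → List (String × String) → List (String × String)
  | '*' :: '*' :: rest, style, buf, tokens =>
      pvParseLineA rest (pvTogB style) [] (pvFlushA tokens buf style)
  | '*' :: rest, style, buf, tokens =>
      pvParseLineA rest (pvTogI style) [] (pvFlushA tokens buf style)
  | c :: rest, style, buf, tokens => pvParseLineA rest style (buf ++ [c]) tokens
  | [], style, buf, tokens => pvFlushA tokens buf style

def tokenize_text_py (text : String) : List (List (String × String)) :=
  (PySem.Chars.splitOn text.toList ['\n']).foldl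
    (fun ps raw =>
      if PySem.Chars.strip raw = [] then ps ++ [([] : List (String × String))]
      else ps ++ [pvParseLineA raw "normal" [] []]) []

-- ===== PORT B =====
-- _emit_seg: pieces = seg.split('*'); emit pieces[0], then toggle italic before each later piece
def pvEmitSeg (seg : List Char) (style : String) (tokens : List (String × String)) :
    String × List (String × String) :=
  match PySem.Chars.splitOn seg ['*'] with
  | [] => (style, tokens)  -- unreachable: str.split never returns an empty list
  | p0 :: rest =>
      rest.foldl
        (fun st piece =>
          let style' := pvTogI st.1
          (style', st.2 ++ (PySem.Chars.split₀ piece).map (fun w => (String.ofList w, style'))))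
        (style, tokens ++ (PySem.Chars.split₀ p0).map (fun w => (String.ofList w, style)))

-- _parse_tokens_line: segs = line.split('**'); emit segs[0], then toggle bold before each later seg
def pvParseLineB (line : List Char) : List (String × String) :=
  match PySem.Chars.splitOn line ['*', '*'] with
  | [] => []  -- unreachable: str.split never returns an empty list
  | s0 :: rest =>
      (rest.foldl (fun st seg => pvEmitSeg seg (pvTogB st.1) st.2)
        (pvEmitSeg s0 "normal" [])).2

def tokenize_text_py_alt (text : String) : List (List (String × String)) :=
  (PySem.Chars.splitOn text.toList ['\n']).map
    (fun raw => if PySem.Chars.strip raw = [] then [] else pvParseLineB raw)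

-- ===== PRECONDITION & SPEC =====
def Spec_tokenize_text_py (text : String) (out : List (List (String × String))) : Prop := out = tokenize_text_py_alt text
instance (text : String) (out : List (List (String × String))) : Decidable (Spec_tokenize_text_py text out) := by unfold Spec_tokenize_text_py; infer_instance

-- ===== CLAIM (what is proved, stated in full; the proofs are below) =====
def Claim_equal_tokenize_text_py : Prop := ∀ (text : String), Dom_tokenize_text_py text → Spec_tokenize_text_py text (tokenize_text_py text)

-- ===== LEMMAS AND PROOFS =====

-- clean specification of str.split(sep) for a nonempty sep, recursion on the string
def pvConsHead (c : Char) : List (List Char) → List (List Char)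
  | [] => [[c]]
  | t :: ts => (c :: t) :: ts

def pvPrepHead (p : List Char) : List (List Char) → List (List Char)
  | [] => [p]
  | t :: ts => (p ++ t) :: ts

def pvSplitSpec (s0 : Char) (sep : List Char) (l : List Char) : List (List Char) :=
  if h : (s0 :: sep).isPrefixOf l then [] :: pvSplitSpec s0 sep (l.drop (sep.length + 1))
  else
    match l with
    | [] => [[]]
    | c :: r => pvConsHead c (pvSplitSpec s0 sep r)
termination_by l.length
decreasing_by
  · have hp : (s0 :: sep) <+: l := by
      simpa [List.isPrefixOf_iff_prefix] using h
    have := hp.length_le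
    simp at this ⊢
    omega
  · simp

def pvWords (style : String) (buf : List Char) : List (String × String) :=
  (PySem.Chars.split₀ buf).map (fun w => (String.ofList w, style))

theorem pvSplitSpec_ne_nil (s0 : Char) (sep : List Char) (l : List Char) :
    pvSplitSpec s0 sep l ≠ [] := by
  rw [pvSplitSpec]
  split
  · simp
  · match l with
    | [] => simp
    | c :: r => cases h : pvSplitSpec s0 sep r <;> simp [pvConsHead, h]

theorem pvPrepHead_consHead (p : List Char) (c : Char) (X : List (List Char)) :
    pvPrepHead p (pvConsHead c X) = pvPrepHead (p ++ [c]) X := by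
  cases X <;> simp [pvConsHead, pvPrepHead]

theorem pvPrepHead_nil (X : List (List Char)) (h : X ≠ []) : pvPrepHead [] X = X := by
  cases X <;> simp_all [pvPrepHead]

theorem pvGo_spec (s0 : Char) (sep : List Char) :
    ∀ fuel l cur acc, l.length < fuel →
      PySem.Chars.splitOn.go (s0 :: sep) fuel l cur acc =
        acc.reverse ++ pvPrepHead cur.reverse (pvSplitSpec s0 sep l) := by
  intro fuel
  induction fuel with
  | zero => intro l cur acc h; omega
  | succ f ih =>
    intro l cur acc h
    match l with
    | [] =>
      rw [pvSplitSpec]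
      simp [PySem.Chars.splitOn.go, List.isPrefixOf, pvPrepHead]
    | c :: r =>
      by_cases hp : (s0 :: sep).isPrefixOf (c :: r) = true
      · have hlen : ((c :: r).drop (sep.length + 1)).length < f := by
          simp at h ⊢; omega
        have : PySem.Chars.splitOn.go (s0 :: sep) (f + 1) (c :: r) cur acc =
            PySem.Chars.splitOn.go (s0 :: sep) f ((c :: r).drop (sep.length + 1)) []
              (cur.reverse :: acc) := by
          simp [PySem.Chars.splitOn.go, hp]
        rw [this, ih _ _ _ hlen]
        simp only [List.reverse_nil]
        rw [pvPrepHead_nil _ (pvSplitSpec_ne_nil s0 sep _)]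
        conv_rhs => rw [pvSplitSpec]
        rw [dif_pos hp]
        simp [pvPrepHead]
      · have hlen : r.length < f := by simp at h; omega
        have : PySem.Chars.splitOn.go (s0 :: sep) (f + 1) (c :: r) cur acc =
            PySem.Chars.splitOn.go (s0 :: sep) f r (c :: cur) acc := by
          simp [PySem.Chars.splitOn.go, hp]
        rw [this, ih _ _ _ hlen]
        conv_rhs => rw [pvSplitSpec]
        simp [hp, pvPrepHead_consHead]

theorem pvSplitOn_eq (s0 : Char) (sep : List Char) (l : List Char) :
    PySem.Chars.splitOn l (s0 :: sep) = pvSplitSpec s0 sep l := by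
  unfold PySem.Chars.splitOn
  rw [pvGo_spec s0 sep (l.length + 1) l [] [] (by omega)]
  simp [pvPrepHead_nil _ (pvSplitSpec_ne_nil s0 sep l)]

-- every word of str.split() is nonempty
theorem pvSplit₀go_ne_nil :
    ∀ (s cur : List Char) (acc : List (List Char)), (∀ x ∈ acc, x ≠ []) →
      ∀ w ∈ PySem.Chars.split₀.go s cur acc, w ≠ [] := by
  intro s
  induction s with
  | nil =>
    intro cur acc hacc w hw
    by_cases hc : cur.isEmpty
    · simp [PySem.Chars.split₀.go, hc] at hw
      exact hacc w hw
    · simp [PySem.Chars.split₀.go, hc] at hw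
      rcases hw with h | h
      · exact hacc w h
      · subst h; simpa [List.isEmpty_iff] using hc
  | cons c rest ih =>
    intro cur acc hacc w hw
    by_cases hs : PySem.Chars.isspace c
    · by_cases hc : cur.isEmpty
      · simp only [PySem.Chars.split₀.go, hs, hc, if_true] at hw
        exact ih [] acc hacc w hw
      · simp only [PySem.Chars.split₀.go, hs, hc, if_true] at hw
        refine ih [] (cur.reverse :: acc) ?_ w hw
        intro x hx
        rcases List.mem_cons.mp hx with hx | hx
        · subst hx; simpa [List.isEmpty_iff] using hc
        · exact hacc x hx
    · simp only [PySem.Chars.split₀.go, hs] at hw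
      exact ih (c :: cur) acc hacc w hw

theorem pvSplit₀_ne_nil (l : List Char) : ∀ w ∈ PySem.Chars.split₀ l, w ≠ [] := by
  intro w hw
  exact pvSplit₀go_ne_nil l [] [] (by simp) w hw

theorem pvFlushA_eq (tokens : List (String × String)) (buf : List Char) (style : String) :
    pvFlushA tokens buf style = tokens ++ pvWords style buf := by
  unfold pvFlushA pvWords
  by_cases hb : buf = []
  · subst hb
    simp [PySem.Chars.split₀, PySem.Chars.split₀.go]
  · rw [if_pos hb]
    rw [PySem.List.foldl_congr_mem (PySem.Chars.split₀ buf) _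
      (fun acc w => acc ++ [(String.ofList w, style)]) tokens
      (by
        intro acc w hw
        have hne : w ≠ [] := pvSplit₀_ne_nil buf w hw
        simp [hne]),
      PySem.List.foldl_append_singleton_eq_map]

-- equations of pvSplitSpec at the separators '*' and '**'
theorem pvSpec_nil (s0 : Char) (sep : List Char) : pvSplitSpec s0 sep [] = [[]] := by
  rw [pvSplitSpec]; simp [List.isPrefixOf]

theorem pvSpec1_star (r : List Char) :
    pvSplitSpec '*' [] ('*' :: r) = [] :: pvSplitSpec '*' [] r := by
  rw [pvSplitSpec]; simp [List.isPrefixOf]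

theorem pvSpec1_char (c : Char) (r : List Char) (hc : c ≠ '*') :
    pvSplitSpec '*' [] (c :: r) = pvConsHead c (pvSplitSpec '*' [] r) := by
  rw [pvSplitSpec]; simp [List.isPrefixOf, Ne.symm hc]

theorem pvSpec2_dstar (r : List Char) :
    pvSplitSpec '*' ['*'] ('*' :: '*' :: r) = [] :: pvSplitSpec '*' ['*'] r := by
  rw [pvSplitSpec]; simp [List.isPrefixOf]

theorem pvSpec2_char (c : Char) (r : List Char) (hc : c ≠ '*') :
    pvSplitSpec '*' ['*'] (c :: r) = pvConsHead c (pvSplitSpec '*' ['*'] r) := by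
  rw [pvSplitSpec]; simp [List.isPrefixOf, Ne.symm hc]

theorem pvSpec2_star (r : List Char) (hr : (['*', '*'] : List Char).isPrefixOf ('*' :: r) = false) :
    pvSplitSpec '*' ['*'] ('*' :: r) = pvConsHead '*' (pvSplitSpec '*' ['*'] r) := by
  rw [pvSplitSpec]; simp [hr]

theorem pvConsHead_prepHead (c : Char) (b : List Char) (X : List (List Char)) :
    pvConsHead c (pvPrepHead b X) = pvPrepHead (c :: b) X := by
  cases X <;> simp [pvConsHead, pvPrepHead]

theorem pvSpec1_starfree (buf : List Char) (hb : '*' ∉ buf) :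
    pvSplitSpec '*' [] buf = [buf] := by
  induction buf with
  | nil => exact pvSpec_nil _ _
  | cons c b ih =>
    have hc : c ≠ '*' := by intro h; exact hb (h ▸ List.mem_cons_self)
    rw [pvSpec1_char c b hc, ih (fun h => hb (List.mem_cons_of_mem c h))]
    simp [pvConsHead]

theorem pvSpec1_append (buf x : List Char) (hb : '*' ∉ buf) :
    pvSplitSpec '*' [] (buf ++ x) = pvPrepHead buf (pvSplitSpec '*' [] x) := by
  induction buf with
  | nil => simp [pvPrepHead_nil _ (pvSplitSpec_ne_nil '*' [] x)]
  | cons c b ih =>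
    have hc : c ≠ '*' := by intro h; exact hb (h ▸ List.mem_cons_self)
    rw [List.cons_append, pvSpec1_char c (b ++ x) hc,
      ih (fun h => hb (List.mem_cons_of_mem c h)), pvConsHead_prepHead]

-- the two _emit_seg shapes the scanner produces
theorem pvEmitSeg_starfree (buf : List Char) (style : String) (tokens : List (String × String))
    (hb : '*' ∉ buf) : pvEmitSeg buf style tokens = (style, tokens ++ pvWords style buf) := by
  unfold pvEmitSeg
  rw [pvSplitOn_eq, pvSpec1_starfree buf hb]
  simp [pvWords]

theorem pvEmitSeg_append (buf h : List Char) (style : String) (tokens : List (String × String))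
    (hb : '*' ∉ buf) :
    pvEmitSeg (buf ++ '*' :: h) style tokens =
      pvEmitSeg h (pvTogI style) (tokens ++ pvWords style buf) := by
  unfold pvEmitSeg
  rw [pvSplitOn_eq, pvSplitOn_eq, pvSpec1_append buf ('*' :: h) hb, pvSpec1_star h]
  obtain ⟨h0, hs, hsplit⟩ : ∃ h0 hs, pvSplitSpec '*' [] h = h0 :: hs := by
    cases hh : pvSplitSpec '*' [] h with
    | nil => exact absurd hh (pvSplitSpec_ne_nil '*' [] h)
    | cons h0 hs => exact ⟨h0, hs, rfl⟩
  rw [hsplit]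
  simp [pvPrepHead, pvWords]

-- B's outer loop, decomposed head/tail (what pvParseLineB computes after the '**' split)
def pvRunB (style : String) (tokens : List (String × String)) :
    List (List Char) → List (String × String)
  | [] => tokens
  | s0 :: rest =>
      (rest.foldl (fun st seg => pvEmitSeg seg (pvTogB st.1) st.2) (pvEmitSeg s0 style tokens)).2

theorem pvSpec2_exists_cons (l : List Char) :
    ∃ h0 t, pvSplitSpec '*' ['*'] l = h0 :: t := by
  cases hh : pvSplitSpec '*' ['*'] l with
  | nil => exact absurd hh (pvSplitSpec_ne_nil '*' ['*'] l)
  | cons h0 t => exact ⟨h0, t, rfl⟩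

theorem pvMain_nil (style : String) (buf : List Char) (tokens : List (String × String))
    (hb : '*' ∉ buf) :
    pvParseLineA [] style buf tokens =
      pvRunB style tokens (pvPrepHead buf (pvSplitSpec '*' ['*'] [])) := by
  rw [pvSpec_nil]
  simp [pvParseLineA, pvPrepHead, pvRunB, pvEmitSeg_starfree _ _ _ hb, pvFlushA_eq, pvWords]

-- MAIN: the scanner from any star-free buffer equals B's two-pass run on the '**' pieces
theorem pvMain :
    ∀ (n : ℕ) (cs : List Char), cs.length ≤ n →
      ∀ (style : String) (buf : List Char) (tokens : List (String × String)), '*' ∉ buf →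
        pvParseLineA cs style buf tokens =
          pvRunB style tokens (pvPrepHead buf (pvSplitSpec '*' ['*'] cs)) := by
  intro n
  induction n with
  | zero =>
    intro cs hlen style buf tokens hb
    have hcs : cs = [] := by cases cs <;> simp at hlen ⊢
    subst hcs
    exact pvMain_nil style buf tokens hb
  | succ n ih =>
    intro cs hlen style buf tokens hb
    cases cs with
    | nil => exact pvMain_nil style buf tokens hb
    | cons c r =>
      by_cases hc : c = '*'
      · subst hc
        -- the two marker cases: does the scanner see '**' or a single '*'?
        cases r with
        | nil =>
          -- cs = ['*'] : a trailing italic marker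
          have hlen2 : ([] : List Char).length ≤ n := by simp
          have hIH := ih [] hlen2 (pvTogI style) [] (pvFlushA tokens buf style) (by simp)
          rw [show pvParseLineA ['*'] style buf tokens
                = pvParseLineA [] (pvTogI style) [] (pvFlushA tokens buf style) from rfl, hIH,
            pvSpec2_star [] (by decide)]
          rw [pvSpec_nil]
          simp only [pvConsHead, pvPrepHead, pvRunB, List.foldl_nil]
          have : buf ++ ['*'] = buf ++ '*' :: [] := rfl
          rw [this, pvEmitSeg_append buf [] style tokens hb,
            pvEmitSeg_starfree _ _ _ (by simp : '*' ∉ ([] : List Char)), pvFlushA_eq]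
          simp [pvEmitSeg_starfree _ _ _ (by simp : '*' ∉ ([] : List Char)), pvWords,
            PySem.Chars.split₀, PySem.Chars.split₀.go]
        | cons c2 r2 =>
          by_cases hc2 : c2 = '*'
          · subst hc2
            -- cs = '*' :: '*' :: r2 : a bold marker
            have hlen2 : r2.length ≤ n := by simp at hlen; omega
            have hIH := ih r2 hlen2 (pvTogB style) [] (pvFlushA tokens buf style) (by simp)
            rw [show pvParseLineA ('*' :: '*' :: r2) style buf tokens
                  = pvParseLineA r2 (pvTogB style) [] (pvFlushA tokens buf style) from rfl, hIH,
              pvSpec2_dstar]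
            obtain ⟨h0, t, hsplit⟩ := pvSpec2_exists_cons r2
            rw [hsplit]
            simp [pvRunB, pvPrepHead, pvEmitSeg_starfree _ _ _ hb, pvFlushA_eq]
          · -- cs = '*' :: c2 :: r2 with c2 ≠ '*' : an italic marker
            have hlen2 : (c2 :: r2).length ≤ n := by simp at hlen ⊢; omega
            have hIH := ih (c2 :: r2) hlen2 (pvTogI style) [] (pvFlushA tokens buf style)
              (by simp)
            have harm : pvParseLineA ('*' :: c2 :: r2) style buf tokens
                = pvParseLineA (c2 :: r2) (pvTogI style) [] (pvFlushA tokens buf style) := by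
              simp [pvParseLineA, hc2]
            have hpre : (['*', '*'] : List Char).isPrefixOf ('*' :: c2 :: r2) = false := by
              simp [List.isPrefixOf, Ne.symm hc2]
            rw [harm, hIH, pvSpec2_star _ hpre, pvPrepHead_consHead]
            obtain ⟨h0, t, hsplit⟩ := pvSpec2_exists_cons (c2 :: r2)
            rw [hsplit]
            have hseg : (buf ++ ['*']) ++ h0 = buf ++ '*' :: h0 := by simp
            simp only [pvPrepHead, pvRunB, hseg]
            rw [pvEmitSeg_append buf h0 style tokens hb, pvFlushA_eq]
            simp
      · -- an ordinary character: it goes into the buffer / into the current piece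
        have hlen2 : r.length ≤ n := by simp at hlen; omega
        have hb2 : '*' ∉ buf ++ [c] := by simp [hb, Ne.symm hc]
        have hIH := ih r hlen2 style (buf ++ [c]) tokens hb2
        have harm : pvParseLineA (c :: r) style buf tokens
            = pvParseLineA r style (buf ++ [c]) tokens := by
          simp [pvParseLineA, hc]
        rw [harm, hIH, pvSpec2_char c r hc, pvPrepHead_consHead]

theorem pvParseLineB_eq (line : List Char) :
    pvParseLineA line "normal" [] [] = pvParseLineB line := by
  rw [pvMain line.length line le_rfl "normal" [] [] (by simp)]
  unfold pvParseLineB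
  rw [pvSplitOn_eq]
  obtain ⟨h0, t, hsplit⟩ : ∃ h0 t, pvSplitSpec '*' ['*'] line = h0 :: t := by
    cases hh : pvSplitSpec '*' ['*'] line with
    | nil => exact absurd hh (pvSplitSpec_ne_nil '*' ['*'] line)
    | cons h0 t => exact ⟨h0, t, rfl⟩
  rw [hsplit]
  simp [pvRunB, pvPrepHead]

-- ===== VERDICT (by name: the statement is the Claim_ definition above) =====
theorem tokenize_text_py_spec : Claim_equal_tokenize_text_py := by
  intro text _
  unfold Spec_tokenize_text_py tokenize_text_py tokenize_text_py_alt
  rw [PySem.List.foldl_congr_mem (PySem.Chars.splitOn text.toList ['\n']) _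
    (fun ps raw =>
      ps ++ [if PySem.Chars.strip raw = [] then ([] : List (String × String))
             else pvParseLineA raw "normal" [] []])
    []
    (by intro ps raw _; by_cases h : PySem.Chars.strip raw = [] <;> simp [h]),
    PySem.List.foldl_append_singleton_eq_map]
  simp only [pvParseLineB_eq, List.nil_append]
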